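-- pv_equiv track=rewrite | github.com/vidrl/mutme | src/mutme/utils.py | _format_gff3_attrs
-- ===== SOURCE A (Python) =====
-- from collections.abc import Iterable, Mapping, Sequence
--
-- def _format_gff3_attrs(attrs: Mapping[str, str]) -> str:
--     """
--     Serialize a dict of GFF3 attributes into the 9th column format key=value;key2=value2.
--     """
--     if not attrs:
--         return "."
--     # Prefer a stable, conventional order: ID first if present, then the rest alphabetically.
--     items = list(attrs.items())
--     if "ID" in attrs:
--         items = [("ID", attrs["ID"])] + [(k, v) for (k, v) in items if k != "ID"]
--     # Sort remaining keys (excluding ID which is already first)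
--     head = items[:1] if items and items[0][0] == "ID" else []
--     tail = items[1:] if head else items
--     tail = sorted(tail, key=lambda kv: kv[0])
--     items = head + tail
--     return ";".join(f"{k}={v}" for k, v in items)
-- ===== SOURCE B (Python) =====
-- from collections.abc import Mapping
--
-- def _format_gff3_attrs(attrs: Mapping[str, str]) -> str:
--     """
--     Serialize a dict of GFF3 attributes into the 9th column format key=value;key2=value2.
--     """
--     if not attrs:
--         return "."
--     # One sort with a composite key: ID (if any) first, then the rest alphabetically.
--     items = sorted(attrs.items(), key=lambda kv: (kv[0] != "ID", kv[0]))
--     return ";".join(f"{k}={v}" for k, v in items)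
-- ===== Notes on version B (the rewrite author's own statement) =====
-- stated objective: simpler
-- what changed: A partitions the items (membership test, list rebuild with ID first, head/tail slicing, concatenation) and sorts only the tail by key; B does a single sort of all items under the composite key (key != 'ID', key), so the partition, slices and concatenation disappear.
import Mathlib
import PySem

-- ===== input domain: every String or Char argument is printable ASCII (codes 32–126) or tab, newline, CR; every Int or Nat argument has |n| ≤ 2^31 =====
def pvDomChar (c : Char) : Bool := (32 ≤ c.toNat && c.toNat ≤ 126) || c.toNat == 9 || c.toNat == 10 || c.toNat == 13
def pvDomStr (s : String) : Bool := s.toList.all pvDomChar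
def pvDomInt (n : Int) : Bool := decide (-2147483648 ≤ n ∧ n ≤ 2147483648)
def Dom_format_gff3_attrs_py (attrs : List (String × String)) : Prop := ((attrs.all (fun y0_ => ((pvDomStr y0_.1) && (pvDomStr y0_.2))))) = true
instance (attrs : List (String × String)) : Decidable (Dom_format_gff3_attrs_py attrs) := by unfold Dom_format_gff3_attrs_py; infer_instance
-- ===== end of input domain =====

-- B replaces A's partition-then-sort (membership test, list rebuild, head/tail slicing, concatenation)
-- with a single sort under a composite key that puts "ID" first; objective: simpler.
-- The dict parameter is materialised at the call boundary as PySem.Dict.ofList attrs in both ports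
-- (Python dict construction: first position, last value wins for a repeated key).

-- ===== PORT A =====
def format_gff3_attrs_py (attrs : List (String × String)) : String :=
  let d : PySem.Dict String String := PySem.Dict.ofList attrs
  if d.items.isEmpty then "."          -- if not attrs: return "."
  else
    let items := d.items               -- items = list(attrs.items())
    let items := if d.contains "ID" then
        -- items = [("ID", attrs["ID"])] + [(k, v) for (k, v) in items if k != "ID"]
        -- (the "ID" lookup is guarded by the containment test, so getD never supplies its default)
        [("ID", d.getD "ID" "")] ++ items.filter (fun kv => kv.1 != "ID")
      else items
    -- head = items[:1] if items and items[0][0] == "ID" else []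
    let head := match items with
      | [] => ([] : List (String × String))
      | kv :: _ => if kv.1 == "ID" then PySem.List.slice items none (some 1) else []
    -- tail = items[1:] if head else items
    let tail := if !head.isEmpty then PySem.List.slice items (some 1) none else items
    let tail := PySem.List.sorted tail (fun kv => kv.1)   -- tail = sorted(tail, key=lambda kv: kv[0])
    let items := head ++ tail
    PySem.Str.join ";" (items.map (fun kv => kv.1 ++ "=" ++ kv.2))

-- ===== PORT B =====
def format_gff3_attrs_py_alt (attrs : List (String × String)) : String :=
  let d : PySem.Dict String String := PySem.Dict.ofList attrs
  if d.items.isEmpty then "."          -- if not attrs: return "."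
  else
    -- items = sorted(attrs.items(), key=lambda kv: (kv[0] != "ID", kv[0]))  (False < True, i.e. 0 < 1)
    let items := PySem.List.sorted2 d.items
      (fun kv => (if kv.1 != "ID" then 1 else 0 : Int)) (fun kv => kv.1)
    PySem.Str.join ";" (items.map (fun kv => kv.1 ++ "=" ++ kv.2))

-- ===== PRECONDITION & SPEC =====
def Spec_format_gff3_attrs_py (attrs : List (String × String)) (out : String) : Prop := out = format_gff3_attrs_py_alt attrs
instance (attrs : List (String × String)) (out : String) : Decidable (Spec_format_gff3_attrs_py attrs out) := by unfold Spec_format_gff3_attrs_py; infer_instance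

-- ===== CLAIM (what is proved, stated in full; the proofs are below) =====
def Claim_equal_format_gff3_attrs_py : Prop := ∀ (attrs : List (String × String)), Dom_format_gff3_attrs_py attrs → Spec_format_gff3_attrs_py attrs (format_gff3_attrs_py attrs)

-- ===== LEMMAS AND PROOFS =====

-- sorted2 with keys k1, k2 is sorted with the lexicographic key toLex (k1 ·, k2 ·)
lemma sorted2_eq_sorted_toLex {α κ₁ κ₂ : Type} [LinearOrder κ₁] [LinearOrder κ₂]
    (xs : List α) (k1 : α → κ₁) (k2 : α → κ₂) :
    PySem.List.sorted2 xs k1 k2 = PySem.List.sorted xs (fun a => toLex (k1 a, k2 a)) := by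
  rw [PySem.List.sorted_eq_foldl_insertBy]
  unfold PySem.List.sorted2
  simp only [if_neg (by decide : ¬ (false = true))]
  have hbe : (fun a b => decide (k1 a < k1 b) || !decide (k1 b < k1 a) && decide (k2 a < k2 b))
      = (fun (a b : α) => decide (toLex (k1 a, k2 a) < toLex (k1 b, k2 b))) := by
    funext a b
    rw [Bool.eq_iff_iff]
    simp only [Prod.Lex.toLex_lt_toLex, Bool.or_eq_true, Bool.and_eq_true, Bool.not_eq_true',
      decide_eq_true_eq, decide_eq_false_iff_not, not_lt]
    constructor
    · rintro (h | ⟨h, h2⟩)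
      · exact Or.inl h
      · rcases eq_or_lt_of_le h with h' | h'
        · exact Or.inr ⟨h', h2⟩
        · exact Or.inl h'
    · rintro (h | ⟨h, h2⟩)
      · exact Or.inl h
      · exact Or.inr ⟨le_of_eq h, h2⟩
  rw [hbe]

-- in a list whose keys are distinct, filtering for a present key keeps exactly its pair
lemma filter_key_eq_singleton (xs : List (String × String)) (v : String)
    (hn : (xs.map Prod.fst).Nodup) (hm : ("ID", v) ∈ xs) :
    xs.filter (fun kv => kv.1 == "ID") = [("ID", v)] := by
  induction xs with
  | nil => cases hm
  | cons p rest ih =>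
    simp only [List.map_cons, List.nodup_cons, List.mem_map] at hn
    rcases List.mem_cons.1 hm with h | h
    · subst h
      simp only [List.filter_cons, beq_self_eq_true]
      have : rest.filter (fun kv => kv.1 == "ID") = [] := by
        apply List.filter_eq_nil_iff.2
        intro kv hkv hbeq
        exact hn.1 ⟨kv, hkv, by simpa using hbeq⟩
      simp [this]
    · have hp : p.1 ≠ "ID" := by
        intro he
        exact hn.1 ⟨("ID", v), h, by simp [he]⟩
      simp only [List.filter_cons]
      rw [if_neg (by simpa using hp)]
      exact ih hn.2 h

-- a sorted-by-key list with distinct keys is strictly key-increasing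
lemma sorted_fst_pairwise_lt (xs : List (String × String))
    (hn : (xs.map Prod.fst).Nodup) :
    (PySem.List.sorted xs (fun kv => kv.1)).Pairwise (fun a b => a.1 < b.1) := by
  have hle := PySem.List.sorted_pairwise xs (fun kv => kv.1)
  have hperm : ((PySem.List.sorted xs (fun kv => kv.1)).map Prod.fst).Perm (xs.map Prod.fst) :=
    (PySem.List.sorted_perm xs (fun kv => kv.1) false).map Prod.fst
  have hnd : ((PySem.List.sorted xs (fun kv => kv.1)).map Prod.fst).Nodup := hperm.nodup_iff.2 hn
  have hne : (PySem.List.sorted xs (fun kv => kv.1)).Pairwise (fun a b => a.1 ≠ b.1) :=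
    (List.pairwise_map).1 hnd
  exact (hle.and hne).imp (fun h => lt_of_le_of_ne h.1 h.2)

-- the key fact: A's reordered item list IS B's single composite-key sort
lemma items_eq (xs : List (String × String)) (hn : (xs.map Prod.fst).Nodup) :
    (let items := if (PySem.Dict.mk xs).contains "ID" then
        [("ID", (PySem.Dict.mk xs).getD "ID" "")] ++ xs.filter (fun kv => kv.1 != "ID")
      else xs
     let head := match items with
      | [] => ([] : List (String × String))
      | kv :: _ => if kv.1 == "ID" then PySem.List.slice items none (some 1) else []
     let tail := if !head.isEmpty then PySem.List.slice items (some 1) none else items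
     head ++ PySem.List.sorted tail (fun kv => kv.1)) =
    PySem.List.sorted2 xs (fun kv => (if kv.1 != "ID" then 1 else 0 : Int)) (fun kv => kv.1) := by
  rw [sorted2_eq_sorted_toLex]
  by_cases hc : (PySem.Dict.mk xs).contains "ID" = true
  · -- "ID" is a key: A puts its (unique) pair first, then sorts the rest by key
    obtain ⟨v, hv⟩ : ∃ v, (PySem.Dict.mk xs).get? "ID" = some v := by
      have := PySem.Dict.contains_eq_isSome_get? (PySem.Dict.mk xs) "ID"
      rw [hc] at this
      exact Option.isSome_iff_exists.1 this.symm
    have hmem : ("ID", v) ∈ xs := PySem.Dict.mem_items_of_get?_eq_some (PySem.Dict.mk xs) hv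
    have hgetD : (PySem.Dict.mk xs).getD "ID" "" = v := PySem.Dict.getD_of_get?_eq_some _ _ hv
    have hfix : xs.filter (fun kv => kv.1 == "ID") = [("ID", v)] :=
      filter_key_eq_singleton xs v hn hmem
    have hfn : ((xs.filter (fun kv => kv.1 != "ID")).map Prod.fst).Nodup :=
      hn.sublist (List.Sublist.map Prod.fst List.filter_sublist)
    simp only [hc, if_pos, hgetD, List.singleton_append, beq_self_eq_true,
      PySem.List.slice_from_one]
    rw [PySem.List.slice_to _ (by norm_num : (0:Int) ≤ 1)]
    simp only [Int.toNat_one, List.take_succ_cons, List.take_zero, List.isEmpty_cons,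
      Bool.not_false, if_true, List.tail_cons, List.singleton_append]
    -- name the sorted order: this strictly lex-increasing rearrangement of xs is sorted(xs, lexkey)
    refine (PySem.List.sorted_eq_of_perm_of_pairwise_lt xs _
      (fun kv => toLex ((if kv.1 != "ID" then 1 else 0 : Int), kv.1)) ?_ ?_).symm
    · -- permutation: ("ID", v) :: filter (≠ "ID") ~ xs
      refine List.Perm.trans (List.Perm.cons _ (PySem.List.sorted_perm _ _ false)) ?_
      have h2 := List.filter_append_perm (fun kv => kv.1 == "ID") xs
      rw [hfix] at h2
      simpa [bne] using h2
    · -- strictly increasing under the composite key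
      rw [List.pairwise_cons]
      constructor
      · intro b hb
        have hb' : b ∈ xs.filter (fun kv => kv.1 != "ID") := (PySem.List.mem_sorted _ _ _ _).1 hb
        have hbne : b.1 ≠ "ID" := by
          have := (List.mem_filter.1 hb').2
          simpa using this
        rw [Prod.Lex.toLex_lt_toLex]
        simp [hbne]
      · refine ((sorted_fst_pairwise_lt _ hfn).imp_of_mem ?_)
        intro a b ha hb hab
        have ha' : a.1 ≠ "ID" := by
          have := (List.mem_filter.1 ((PySem.List.mem_sorted _ _ _ _).1 ha)).2
          simpa using this
        have hb' : b.1 ≠ "ID" := by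
          have := (List.mem_filter.1 ((PySem.List.mem_sorted _ _ _ _).1 hb)).2
          simpa using this
        rw [Prod.Lex.toLex_lt_toLex]
        simp [ha', hb', hab]
  · -- no "ID" key: A just sorts everything by key
    have hnid : ∀ kv ∈ xs, kv.1 ≠ "ID" := by
      intro kv hkv he
      apply hc
      rw [PySem.Dict.contains_eq_decide_mem_keys]
      simp only [decide_eq_true_eq]
      exact he ▸ (List.mem_map_of_mem hkv : kv.1 ∈ xs.map Prod.fst)
    simp only [if_neg hc]
    have hhead : (match xs with
        | [] => ([] : List (String × String))
        | kv :: _ => if kv.1 == "ID" then PySem.List.slice xs none (some 1) else []) = [] := by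
      cases xs with
      | nil => rfl
      | cons kv rest =>
        have : kv.1 ≠ "ID" := hnid kv (List.mem_cons_self ..)
        simp [this]
    rw [hhead]
    simp only [List.isEmpty_nil, Bool.not_true, List.nil_append]
    refine (PySem.List.sorted_eq_of_perm_of_pairwise_lt xs _
      (fun kv => toLex ((if kv.1 != "ID" then 1 else 0 : Int), kv.1)) ?_ ?_).symm
    · exact PySem.List.sorted_perm _ _ false
    · refine ((sorted_fst_pairwise_lt _ hn).imp_of_mem ?_)
      intro a b ha hb hab
      have ha' : a.1 ≠ "ID" := hnid a ((PySem.List.mem_sorted _ _ _ _).1 ha)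
      have hb' : b.1 ≠ "ID" := hnid b ((PySem.List.mem_sorted _ _ _ _).1 hb)
      rw [Prod.Lex.toLex_lt_toLex]
      simp [ha', hb', hab]

theorem format_gff3_attrs_py_spec : Claim_equal_format_gff3_attrs_py := by
  intro attrs _
  unfold Spec_format_gff3_attrs_py format_gff3_attrs_py format_gff3_attrs_py_alt
  by_cases he : (PySem.Dict.ofList attrs : PySem.Dict String String).items.isEmpty = true
  · simp only [he, if_true]
  · simp only [if_neg he]
    have hn : (((PySem.Dict.ofList attrs : PySem.Dict String String).items).map Prod.fst).Nodup :=
      PySem.Dict.nodup_keys_ofList attrs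
    have h := items_eq ((PySem.Dict.ofList attrs : PySem.Dict String String).items) hn
    simp only [] at h ⊢
    rw [h]
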